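-- pv_equiv track=rewrite | github.com/vc8csxgk8r-stack/wine | backend/app.py | interpoler_note
-- ===== SOURCE A (Python) =====
-- def interpoler_note(region_notes, millesime):
--     """Retourne la note exacte si connue, sinon interpole depuis les années voisines."""
--     if millesime in region_notes:
--         return region_notes[millesime], False  # note exacte, pas une estimation
--
--     annees = sorted(region_notes.keys())
--     if not annees:
--         return 88, True
--
--     # Avant la première année connue
--     if millesime < annees[0]:
--         return region_notes[annees[0]], True
--
--     # Après la dernière année connue
--     if millesime > annees[-1]:
--         # Utiliser la moyenne des 3 dernières années connues
--         recentes = annees[-3:]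
--         return round(sum(region_notes[a] for a in recentes) / len(recentes)), True
--
--     # Interpolation linéaire entre les deux années encadrantes
--     for i in range(len(annees) - 1):
--         a1, a2 = annees[i], annees[i + 1]
--         if a1 < millesime < a2:
--             n1, n2 = region_notes[a1], region_notes[a2]
--             p = (millesime - a1) / (a2 - a1)
--             return round(n1 + p * (n2 - n1)), True
--
--     return 88, True
-- ===== SOURCE B (Python) =====
-- def interpoler_note(region_notes, millesime):
--     """Hand-written binary search over the sorted years drives all branches."""
--     annees = sorted(region_notes)
--     if not annees:
--         return 88, True
--     lo, hi = 0, len(annees)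
--     while lo < hi:
--         mid = (lo + hi) // 2
--         if annees[mid] < millesime:
--             lo = mid + 1
--         else:
--             hi = mid
--     if lo < len(annees) and annees[lo] == millesime:
--         return region_notes[millesime], False
--     if lo == 0:
--         return region_notes[annees[0]], True
--     if lo == len(annees):
--         recentes = annees[-3:]
--         return round(sum(region_notes[a] for a in recentes) / len(recentes)), True
--     a1, a2 = annees[lo - 1], annees[lo]
--     n1, n2 = region_notes[a1], region_notes[a2]
--     p = (millesime - a1) / (a2 - a1)
--     return round(n1 + p * (n2 - n1)), True
-- ===== Notes on version B (the rewrite author's own statement) =====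
-- stated objective: alternative
-- what changed: A finds the bracketing pair of years by a linear scan over adjacent pairs of the sorted keys (after separate membership/empty/boundary guards); B runs one hand-written binary search over the sorted keys and lets its landing index decide all branches (exact hit, before-first, after-last, interior interpolation).
import Mathlib
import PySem

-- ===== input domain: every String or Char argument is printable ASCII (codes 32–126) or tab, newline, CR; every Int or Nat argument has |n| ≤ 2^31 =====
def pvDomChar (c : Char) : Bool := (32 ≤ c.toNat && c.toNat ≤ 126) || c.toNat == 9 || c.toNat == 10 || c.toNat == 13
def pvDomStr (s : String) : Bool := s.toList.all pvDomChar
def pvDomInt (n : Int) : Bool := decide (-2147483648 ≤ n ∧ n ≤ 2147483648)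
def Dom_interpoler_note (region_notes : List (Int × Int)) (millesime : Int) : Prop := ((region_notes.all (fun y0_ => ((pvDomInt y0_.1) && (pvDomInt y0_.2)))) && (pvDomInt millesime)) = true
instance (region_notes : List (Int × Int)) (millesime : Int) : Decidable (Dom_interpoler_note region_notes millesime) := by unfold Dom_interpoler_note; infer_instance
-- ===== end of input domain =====

-- B replaces A's linear scan for the bracketing pair of years by a hand-written binary
-- search over the same sorted key list that also decides the exact/before/after branches
-- (objective: alternative decomposition; return values identical).

-- ===== shared float helpers =====
-- Both Pythons evaluate `round(…)` of expressions computed in IEEE-754 double precision.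
-- The helpers below model that double-precision evaluation EXACTLY (on this bounded
-- integer domain no overflow/subnormal arises): pvRhei is nearest-integer with ties to
-- even; pvFlq rounds a rational num/den (den > 0) to the nearest double, represented
-- exactly as (mantissa, exponent) with value m·2^e; pvFmul / pvFadd are double * and +;
-- pvFround is Python's round() on such a double. Both ports call them with identical
-- arguments, so the equivalence proof never unfolds them.
def pvRhei (N D : Int) : Int :=
  let q := PySem.Int.floordiv N D
  let r := N - q * D
  if 2 * r < D then q else if D < 2 * r then q + 1
  else if PySem.Int.mod q 2 = 0 then q else q + 1

def pvFlq (num den : Int) : Int × Int :=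
  if num = 0 then (0, 0) else
  let s : Int := if 0 < num then 1 else -1
  let N := |num|
  let s0 : Int := (PySem.Int.bitLength den : Int) + 53 - (PySem.Int.bitLength N : Int)
  let t := if 0 ≤ s0 then (N * 2 ^ s0.toNat, den) else (N, den * 2 ^ (-s0).toNat)
  let u := if t.2 * 2 ^ 53 ≤ t.1 then (t.2 * 2, -s0 + 1) else (t.2, -s0)
  (s * pvRhei t.1 u.1, u.2)

def pvFl2 (m e : Int) : Int × Int :=
  if 0 ≤ e then pvFlq (m * 2 ^ e.toNat) 1 else pvFlq m (2 ^ (-e).toNat)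

def pvFmul (a b : Int × Int) : Int × Int := pvFl2 (a.1 * b.1) (a.2 + b.2)

def pvFadd (a b : Int × Int) : Int × Int :=
  let e := min a.2 b.2
  pvFl2 (a.1 * 2 ^ (a.2 - e).toNat + b.1 * 2 ^ (b.2 - e).toNat) e

def pvFround (a : Int × Int) : Int :=
  if 0 ≤ a.2 then a.1 * 2 ^ a.2.toNat else pvRhei a.1 (2 ^ (-a.2).toNat)

-- round(n1 + ((m-a1)/(a2-a1)) * (n2-n1)) evaluated in doubles: d = m-a1, w = a2-a1
def pvInterp (n1 n2 d w : Int) : Int :=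
  pvFround (pvFadd (n1, 0) (pvFmul (pvFlq d w) (n2 - n1, 0)))

-- round(s / l) evaluated in doubles
def pvMeanRound (s l : Int) : Int := pvFround (pvFlq s l)

-- ===== PORT A =====
-- the for-loop over range(len(annees)-1), as structural recursion over adjacent pairs
def interpA_loop (d : PySem.Dict Int Int) (m : Int) : List Int → Int × Bool
  | a1 :: a2 :: rest =>
      if a1 < m ∧ m < a2 then
        (pvInterp (d.getD a1 0) (d.getD a2 0) (m - a1) (a2 - a1), true)
      else interpA_loop d m (a2 :: rest)
  | _ => (88, true)

def interpoler_note (region_notes : List (Int × Int)) (millesime : Int) : Int × Bool :=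
  let d := PySem.Dict.mk region_notes
  if d.contains millesime then (d.getD millesime 0, false)
  else
    let annees := PySem.List.sorted d.keys (fun x => x) false
    if annees = [] then (88, true)
    else if millesime < PySem.List.pyGetD annees 0 0 then
      (d.getD (PySem.List.pyGetD annees 0 0) 0, true)
    else if PySem.List.pyGetD annees (-1) 0 < millesime then
      let recentes := PySem.List.slice annees (some (-3)) none
      (pvMeanRound ((recentes.map (fun a => d.getD a 0)).sum) (recentes.length : Int), true)
    else interpA_loop d millesime annees

-- ===== PORT B =====
-- the while lo < hi binary-search loop of Source B
def bsearchB (annees : List Int) (m : Int) (lo hi : Nat) : Nat :=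
  if lo < hi then
    let mid := (lo + hi) / 2
    if PySem.List.pyGetD annees (mid : Int) 0 < m then bsearchB annees m (mid + 1) hi
    else bsearchB annees m lo mid
  else lo
termination_by hi - lo
decreasing_by all_goals omega

def interpoler_note_alt (region_notes : List (Int × Int)) (millesime : Int) : Int × Bool :=
  let d := PySem.Dict.mk region_notes
  let annees := PySem.List.sorted d.keys (fun x => x) false
  if annees = [] then (88, true)
  else
    let lo := bsearchB annees millesime 0 annees.length
    if lo < annees.length ∧ PySem.List.pyGetD annees (lo : Int) 0 = millesime then
      (d.getD millesime 0, false)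
    else if lo = 0 then (d.getD (PySem.List.pyGetD annees 0 0) 0, true)
    else if lo = annees.length then
      let recentes := PySem.List.slice annees (some (-3)) none
      (pvMeanRound ((recentes.map (fun a => d.getD a 0)).sum) (recentes.length : Int), true)
    else
      let a1 := PySem.List.pyGetD annees ((lo : Int) - 1) 0
      let a2 := PySem.List.pyGetD annees (lo : Int) 0
      (pvInterp (d.getD a1 0) (d.getD a2 0) (millesime - a1) (a2 - a1), true)

-- ===== PRECONDITION & SPEC =====
def Spec_interpoler_note (region_notes : List (Int × Int)) (millesime : Int) (out : Int × Bool) : Prop := out = interpoler_note_alt region_notes millesime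
instance (region_notes : List (Int × Int)) (millesime : Int) (out : Int × Bool) : Decidable (Spec_interpoler_note region_notes millesime out) := by unfold Spec_interpoler_note; infer_instance
-- ===== CLAIM (what is proved, stated in full; the proofs are below) =====
def Claim_equal_interpoler_note : Prop := ∀ (region_notes : List (Int × Int)) (millesime : Int), Dom_interpoler_note region_notes millesime → Spec_interpoler_note region_notes millesime (interpoler_note region_notes millesime)

-- ===== LEMMAS AND PROOFS =====

theorem bsearchB_bounds (a : List Int) (m : Int) (lo hi : Nat) (h : lo ≤ hi) :
    lo ≤ bsearchB a m lo hi ∧ bsearchB a m lo hi ≤ hi := by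
  fun_induction bsearchB a m lo hi with
  | case1 lo hi hlt mid hm ih =>
      have hm2 : mid = (lo + hi) / 2 := rfl
      have := ih (by omega)
      exact ⟨by omega, by omega⟩
  | case2 lo hi hlt mid hm ih =>
      have hm2 : mid = (lo + hi) / 2 := rfl
      have := ih (by omega)
      exact ⟨by omega, by omega⟩
  | case3 lo hi hge => omega

theorem bsearchB_inv (a : List Int) (m : Int) (lo hi : Nat)
    (hs : ∀ i j (_ : i < a.length) (_ : j < a.length), i ≤ j → a[i] ≤ a[j])
    (hhi : hi ≤ a.length)
    (h1 : ∀ i (_ : i < a.length), i < lo → a[i] < m)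
    (h2 : ∀ i (_ : i < a.length), hi ≤ i → m ≤ a[i]) :
    (∀ i (_ : i < a.length), i < bsearchB a m lo hi → a[i] < m) ∧
    (∀ i (_ : i < a.length), bsearchB a m lo hi ≤ i → m ≤ a[i]) := by
  fun_induction bsearchB a m lo hi with
  | case1 lo hi hlt mid hm ih =>
      have hm2 : mid = (lo + hi) / 2 := rfl
      have hmidlt : mid < a.length := by omega
      simp only [PySem.List.pyGetD_natCast] at hm
      rw [List.getD_eq_getElem _ _ hmidlt] at hm
      refine ih hhi ?_ h2
      intro i hi2 hilt
      exact lt_of_le_of_lt (hs i mid hi2 hmidlt (by omega)) hm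
  | case2 lo hi hlt mid hm ih =>
      have hm2 : mid = (lo + hi) / 2 := rfl
      have hmidlt : mid < a.length := by omega
      simp only [PySem.List.pyGetD_natCast] at hm
      rw [List.getD_eq_getElem _ _ hmidlt] at hm
      push Not at hm
      refine ih (by omega) h1 ?_
      intro i hi2 hge
      exact le_trans hm (hs mid i hmidlt hi2 hge)
  | case3 lo hi hge => exact ⟨h1, fun i hi2 hle => h2 i hi2 (by omega)⟩

theorem loopA_eq (d : PySem.Dict Int Int) (m : Int) (a : List Int) (j : Nat)
    (hj1 : 1 ≤ j) (hj : j < a.length)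
    (hlt : ∀ i (_ : i < a.length), i < j → a[i] < m)
    (hgt : m < a[j]) :
    interpA_loop d m a =
      (pvInterp (d.getD (a[j-1]'(by omega)) 0) (d.getD a[j] 0)
        (m - a[j-1]'(by omega)) (a[j] - a[j-1]'(by omega)), true) := by
  induction a generalizing j with
  | nil => simp at hj
  | cons a1 t ih =>
    cases t with
    | nil => simp at hj; omega
    | cons a2 r =>
      obtain ⟨k, rfl⟩ : ∃ k, j = k + 1 := ⟨j - 1, by omega⟩
      by_cases hone : k = 0
      · subst hone
        have hcond : a1 < m ∧ m < a2 := ⟨hlt 0 (by simp) (by omega), by simpa using hgt⟩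
        simp [interpA_loop, hcond]
      · have ha2 : a2 < m := by simpa using hlt 1 (by simp) (by omega)
        have hcond : ¬ (a1 < m ∧ m < a2) := fun h => absurd h.2 (not_lt.mpr (le_of_lt ha2))
        rw [interpA_loop, if_neg hcond]
        have hlen : k < (a2 :: r).length := by simpa using hj
        have hrec := ih k (by omega) hlen
          (fun i hi2 hilt => by simpa using hlt (i + 1) (by simpa using hi2) (by omega))
          (by simpa using hgt)
        rw [hrec]
        obtain ⟨k2, rfl⟩ : ∃ k2, k = k2 + 1 := ⟨k - 1, by omega⟩
        simp

-- ===== VERDICT (by name: the statement is the Claim_ definition above) =====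
theorem interpoler_note_spec : Claim_equal_interpoler_note := by
  unfold Claim_equal_interpoler_note
  intro rn m _
  unfold Spec_interpoler_note
  simp only [interpoler_note, interpoler_note_alt]
  set d := PySem.Dict.mk rn with hd
  set ann := PySem.List.sorted d.keys (fun x => x) false with hann
  have hpw : ann.Pairwise (· ≤ ·) := PySem.List.sorted_pairwise d.keys (fun x => x)
  have hs : ∀ i j (_ : i < ann.length) (_ : j < ann.length), i ≤ j → ann[i] ≤ ann[j] := by
    intro i j hi hj hij
    rcases Nat.lt_or_ge i j with h | h
    · exact (List.pairwise_iff_getElem.mp hpw) i j hi hj h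
    · have : i = j := by omega
      subst this; exact le_refl _
  have hcont : d.contains m = true ↔ m ∈ ann := by
    rw [PySem.Dict.contains_iff_mem_keys, hann, PySem.List.mem_sorted]
  set len := ann.length with hlen
  set L := bsearchB ann m 0 len with hL
  have hbounds := bsearchB_bounds ann m 0 len (Nat.zero_le _)
  have hspec := bsearchB_inv ann m 0 len hs (le_refl _)
    (fun i _ h => absurd h (Nat.not_lt_zero i))
    (fun i hi2 hge => absurd hge (by omega))
  rcases List.eq_nil_or_concat' ann with hnil | ⟨_, _, hne⟩
  · -- empty: contains is false, both return (88, true)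
    have hc : ¬ d.contains m = true := fun h => by
      have := hcont.mp h; rw [hnil] at this; simp at this
    simp [hnil, hc]
  · have hne2 : ann ≠ [] := by rw [hne]; simp
    have hlenpos : 0 < len := by rw [hlen]; exact List.length_pos_iff.mpr hne2
    have hg0 : PySem.List.pyGetD ann 0 0 = ann[0]'(by omega) := by
      rw [PySem.List.pyGetD_zero, List.getD_eq_getElem _ _ (by omega)]
    have hglast : PySem.List.pyGetD ann (-1) 0 = ann[len-1]'(by omega) := by
      rw [PySem.List.pyGetD_neg_one ann 0 hne2, List.getLast_eq_getElem]
    by_cases hc : d.contains m = true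
    · -- exact hit
      have hm : m ∈ ann := hcont.mp hc
      obtain ⟨j, hjlen, hjm⟩ := List.mem_iff_getElem.mp hm
      have hjL : L ≤ j := by
        by_contra h
        have := hspec.1 j hjlen (by omega)
        rw [hjm] at this
        omega
      have hLlen : L < len := by omega
      have hLm : ann[L]'(by omega) = m := le_antisymm
        (hjm ▸ hs L j (by omega) hjlen hjL) (hspec.2 L (by omega) (le_refl _))
      have hgLm : PySem.List.pyGetD ann (L : Int) 0 = m := by
        rw [PySem.List.pyGetD_natCast, List.getD_eq_getElem _ _ (by omega)]; exact hLm
      rw [if_pos hc, if_neg hne2, if_pos ⟨hLlen, hgLm⟩]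
    · -- miss
      have hnm : m ∉ ann := fun h => hc (hcont.mpr h)
      have hne0 : ann[0]'(by omega) ≠ m := fun h => hnm (h ▸ List.getElem_mem _)
      rw [if_neg hc, if_neg hne2, if_neg hne2]
      by_cases hb : m < PySem.List.pyGetD ann 0 0
      · -- before the first year
        have hL0 : L = 0 := by
          by_contra h
          have := hspec.1 0 (by omega) (by omega)
          rw [hg0] at hb; omega
        have hcb1 : ¬ (L < len ∧ PySem.List.pyGetD ann (L : Int) 0 = m) := by
          rintro ⟨-, h⟩
          rw [hL0] at h
          exact hne0 (by rw [← hg0]; exact_mod_cast h)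
        rw [if_pos hb, if_neg hcb1, if_pos hL0]
      · by_cases hafter : PySem.List.pyGetD ann (-1) 0 < m
        · -- after the last year
          have hLlen : L = len := by
            by_contra h
            have h1 := hspec.2 L (by omega) (le_refl _)
            have h2 := hs L (len-1) (by omega) (by omega) (by omega)
            rw [hglast] at hafter; omega
          have hcb1 : ¬ (L < len ∧ PySem.List.pyGetD ann (L : Int) 0 = m) := by
            rintro ⟨h, -⟩; omega
          rw [if_neg hb, if_pos hafter, if_neg hcb1, if_neg (by omega), if_pos hLlen]
        · -- interior
          have hb' := hb
          rw [hg0] at hb'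
          have hafter' := hafter
          rw [hglast] at hafter'
          have h0m : ann[0]'(by omega) < m := lt_of_le_of_ne (by omega) hne0
          have hL1 : 1 ≤ L := by
            by_contra h
            have := hspec.2 0 (by omega) (by omega)
            omega
          have hLlen : L < len := by
            by_contra h
            have := hspec.1 (len-1) (by omega) (by omega)
            omega
          have hgtL : m < ann[L]'(by omega) := by
            have h1 := hspec.2 L (by omega) (le_refl _)
            have h2 : ann[L]'(by omega) ≠ m := fun h => hnm (h ▸ List.getElem_mem _)
            omega
          have hltL1 : ann[L-1]'(by omega) < m := hspec.1 (L-1) (by omega) (by omega)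
          have hcb1 : ¬ (L < len ∧ PySem.List.pyGetD ann (L : Int) 0 = m) := by
            rintro ⟨-, h⟩
            rw [PySem.List.pyGetD_natCast, List.getD_eq_getElem _ _ (by omega)] at h
            omega
          have hgL : PySem.List.pyGetD ann (L : Int) 0 = ann[L]'(by omega) := by
            rw [PySem.List.pyGetD_natCast, List.getD_eq_getElem _ _ (by omega)]
          have hgL1 : PySem.List.pyGetD ann ((L : Int) - 1) 0 = ann[L-1]'(by omega) := by
            have hcast : (L : Int) - 1 = ((L - 1 : Nat) : Int) := by omega
            rw [hcast, PySem.List.pyGetD_natCast, List.getD_eq_getElem _ _ (by omega)]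
          rw [if_neg hb, if_neg hafter, if_neg hcb1, if_neg (by omega), if_neg (by omega),
            hgL, hgL1]
          exact loopA_eq d m ann L hL1 (by omega) hspec.1 hgtL
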